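-- pv_equiv track=rewrite | github.com/Juncheng-Li/KT_project1 | nGram.py | calc
-- ===== SOURCE A (Python) =====
-- from collections import Counter
--
-- def split(string, length, step=1):
--     return (string[0+i:length+i] for i in range(0, len(string), step))
--
-- def grams(word, n):
--     gram = list(split(word, n))
--     if len(gram[-1]) == 1 and len(gram) > 1:
--         gram.pop(-1)
--     return gram
--
-- def calc(string1, string2):
--     gramList1 = grams(string1, 2)
--     gramList2 = grams(string2, 2)
--     sum = len(gramList1) + len(gramList2)
--     set1 = set(gramList1)
--     set2 = set(gramList2)
--     inter = set1.intersection(set2)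
--     inter = list(inter)
--     interse = len(inter)
--
--     duplicate1 = Counter(gramList1)
--     duplicate2 = Counter(gramList2)
--     for element in inter:
--         m = duplicate1[element]
--         n = duplicate2[element]
--         num = min(m, n)
--         if num > 1:
--             interse += num - 1
--
--     score = sum - 2 * interse
--     return score
-- ===== SOURCE B (Python) =====
-- from collections import Counter
--
-- def split(string, length, step=1):
--     return (string[0+i:length+i] for i in range(0, len(string), step))
--
-- def grams(word, n):
--     gram = list(split(word, n))
--     if len(gram[-1]) == 1 and len(gram) > 1:
--         gram.pop(-1)
--     return gram
--
-- def calc(string1, string2):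
--     c1 = Counter(grams(string1, 2))
--     c2 = Counter(grams(string2, 2))
--     return sum(max(v - c2[k], 0) for k, v in c1.items()) \
--          + sum(max(v - c1[k], 0) for k, v in c2.items())
-- ===== Notes on version B (the rewrite author's own statement) =====
-- stated objective: simpler
-- what changed: B keeps split/grams verbatim but replaces A's set construction, intersection, list conversion and min-accumulating loop by two direct Counter symmetric-difference sums: sum(max(v-c2[k],0)) + sum(max(v-c1[k],0)).
import Mathlib
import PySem

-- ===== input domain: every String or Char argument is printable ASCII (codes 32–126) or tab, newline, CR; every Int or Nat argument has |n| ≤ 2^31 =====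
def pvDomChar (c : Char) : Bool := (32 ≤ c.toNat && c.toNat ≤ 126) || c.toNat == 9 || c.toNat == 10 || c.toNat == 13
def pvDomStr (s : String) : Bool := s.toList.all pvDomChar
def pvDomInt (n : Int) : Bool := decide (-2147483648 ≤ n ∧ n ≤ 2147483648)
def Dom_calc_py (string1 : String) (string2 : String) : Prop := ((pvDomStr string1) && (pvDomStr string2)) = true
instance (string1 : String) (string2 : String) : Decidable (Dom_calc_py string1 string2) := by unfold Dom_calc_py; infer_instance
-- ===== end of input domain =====

-- B replaces A's set intersection + min-accumulating loop by two direct Counter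
-- symmetric-difference sums (objective: simpler); both keep split/grams verbatim.

-- ===== PORT A =====
-- split(string, length, step=1) with step = 1, as a list (list(generator))
def pvSplit (s : List Char) (length : Int) : List (List Char) :=
  (PySem.List.pyRange 0 (s.length : Int) 1).map
    (fun i => PySem.List.slice s (some (0 + i)) (some (length + i)))

-- grams(word, n); none = IndexError from gram[-1] on the empty word
def pvGrams? (word : List Char) (n : Int) : Option (List (List Char)) :=
  let gram := pvSplit word n
  match PySem.List.pyGet? gram (-1) with
  | none => none
  | some last =>
      some (if last.length = 1 ∧ gram.length > 1 then gram.dropLast else gram)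

def calc_py (string1 : String) (string2 : String) : Int :=
  match pvGrams? string1.toList 2, pvGrams? string2.toList 2 with
  | some gramList1, some gramList2 =>
      let sum : Int := (gramList1.length : Int) + (gramList2.length : Int)
      let set1 := PySem.Set.ofList gramList1
      let set2 := PySem.Set.ofList gramList2
      -- list(set1.intersection(set2)): the loop below sums over it, so hash order is immaterial
      let inter := PySem.Set.inter set1 set2
      let interse0 : Int := (inter.length : Int)
      let duplicate1 := PySem.Dict.counter gramList1
      let duplicate2 := PySem.Dict.counter gramList2
      let interse := inter.foldl (fun acc element =>
        let m := duplicate1.getD element 0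
        let n := duplicate2.getD element 0
        let num := min m n
        if num > 1 then acc + (num - 1) else acc) interse0
      sum - 2 * interse
  | _, _ => 0   -- unreachable under Pre_ (Python raises IndexError)

-- ===== PORT B =====
-- Source B carries the same split/grams helpers verbatim; B's port gets its own copies
def pvSplitB (s : List Char) (length : Int) : List (List Char) :=
  (PySem.List.pyRange 0 (s.length : Int) 1).map
    (fun i => PySem.List.slice s (some (0 + i)) (some (length + i)))

def pvGramsB? (word : List Char) (n : Int) : Option (List (List Char)) :=
  let gram := pvSplitB word n
  match PySem.List.pyGet? gram (-1) with
  | none => none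
  | some last =>
      some (if last.length = 1 ∧ gram.length > 1 then gram.dropLast else gram)

def calc_py_alt (string1 : String) (string2 : String) : Int :=
  match pvGramsB? string1.toList 2 with
  | none => 0   -- unreachable under Pre_ (Python raises IndexError)
  | some g1 =>
    match pvGramsB? string2.toList 2 with
    | none => 0   -- unreachable under Pre_ (Python raises IndexError)
    | some g2 =>
        let c1 := PySem.Dict.counter g1
        let c2 := PySem.Dict.counter g2
        (c1.items.map (fun kv => max (kv.2 - c2.getD kv.1 0) 0)).sum
          + (c2.items.map (fun kv => max (kv.2 - c1.getD kv.1 0) 0)).sum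

-- ===== PRECONDITION & SPEC =====
-- Pre_ excludes only the inputs where Python A raises: grams does gram[-1], an
-- IndexError when either string is empty.
def Pre_calc_py (string1 : String) (string2 : String) : Prop :=
  string1.toList ≠ [] ∧ string2.toList ≠ []
instance (string1 : String) (string2 : String) : Decidable (Pre_calc_py string1 string2) := by
  unfold Pre_calc_py; infer_instance
def pvWitness_calc_py : String × String := ("night", "nacht")

def Spec_calc_py (string1 : String) (string2 : String) (out : Int) : Prop := out = calc_py_alt string1 string2
instance (string1 : String) (string2 : String) (out : Int) : Decidable (Spec_calc_py string1 string2 out) := by unfold Spec_calc_py; infer_instance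

-- ===== CLAIM (what is proved, stated in full; the proofs are below) =====
def Claim_equal_calc_py : Prop := ∀ (string1 : String) (string2 : String), Dom_calc_py string1 string2 → Pre_calc_py string1 string2 → Spec_calc_py string1 string2 (calc_py string1 string2)

-- ===== LEMMAS AND PROOFS =====

-- List.count does not depend on which lawful BEq instance is used
theorem count_beq_irrel {α : Type} [DecidableEq α] [i : BEq α] [LawfulBEq α]
    (l : List α) (x : α) :
    l.count x = @List.count α instBEqOfDecidableEq x l := by
  induction l with
  | nil => rfl
  | cons a t ih => rw [List.count_cons, @List.count_cons α instBEqOfDecidableEq, ih]; simp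

-- A's accumulation loop, as init + a mapped sum
theorem loopA_eq (d1 d2 : PySem.Dict (List Char) Int) (l : List (List Char)) (c : Int) :
    l.foldl (fun acc element =>
      let m := d1.getD element 0
      let n := d2.getD element 0
      let num := min m n
      if num > 1 then acc + (num - 1) else acc) c
    = c + (l.map (fun e =>
        if min (d1.getD e 0) (d2.getD e 0) > 1
        then min (d1.getD e 0) (d2.getD e 0) - 1 else 0)).sum := by
  induction l generalizing c with
  | nil => simp
  | cons a t ih =>
      simp only [List.foldl_cons, List.map_cons, List.sum_cons, ih]
      split_ifs <;> ring

-- |l| + Σ (h e - 1 if h e > 1 else 0) = Σ h e, when h ≥ 1 on l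
theorem len_add_sum (l : List (List Char)) (h : List Char → Int)
    (hpos : ∀ e ∈ l, 1 ≤ h e) :
    (l.length : Int) + (l.map (fun e => if h e > 1 then h e - 1 else 0)).sum
      = (l.map h).sum := by
  induction l with
  | nil => simp
  | cons a t ih =>
      have h1 : 1 ≤ h a := hpos a (by simp)
      have ht : ∀ e ∈ t, 1 ≤ h e := fun e he => hpos e (by simp [he])
      have := ih ht
      simp only [List.map_cons, List.sum_cons, List.length_cons]
      push_cast
      split_ifs <;> omega

-- a Nodup list's mapped sum is a Finset sum over its toFinset
theorem sum_map_nodup (l : List (List Char)) (f : List Char → Int) (h : l.Nodup) :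
    (l.map f).sum = ∑ a ∈ l.toFinset, f a :=
  (List.sum_toFinset (fun a => f a) h).symm

theorem length_eq_sum_count (l : List (List Char)) :
    (l.length : Int) = ∑ a ∈ l.toFinset, (l.count a : Int) := by
  have h := Multiset.toFinset_sum_count_eq (l : Multiset (List Char))
  rw [Multiset.coe_card] at h
  have h2 : ∑ a ∈ l.toFinset, l.count a = l.length := by
    rw [← h]
    refine Finset.sum_congr (by simp) ?_
    intro x hx
    rw [count_beq_irrel]
    simp [Multiset.coe_count]
  rw [← h2]
  push_cast
  rfl

-- the multiset identity behind the equivalence: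
-- |g1| + |g2| - 2·Σ_{e∈g1∩g2} min(c1 e, c2 e) = Σ (c1-c2)⁺ + Σ (c2-c1)⁺
theorem key_identity (g1 g2 : List (List Char)) :
    (g1.length : Int) + (g2.length : Int)
      - 2 * ((PySem.Set.inter (PySem.Set.ofList g1) (PySem.Set.ofList g2)).map
          (fun e => min ((g1.count e : Int)) ((g2.count e : Int)))).sum
    = ((PySem.Set.ofList g1).map (fun k => max ((g1.count k : Int) - (g2.count k : Int)) 0)).sum
      + ((PySem.Set.ofList g2).map (fun k => max ((g2.count k : Int) - (g1.count k : Int)) 0)).sum := by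
  classical
  have hf1 : (PySem.Set.ofList g1).toFinset = g1.toFinset := by
    ext x; simp [PySem.Set.mem_ofList]
  have hf2 : (PySem.Set.ofList g2).toFinset = g2.toFinset := by
    ext x; simp [PySem.Set.mem_ofList]
  have hfi : (PySem.Set.inter (PySem.Set.ofList g1) (PySem.Set.ofList g2)).toFinset
      = g1.toFinset ∩ g2.toFinset := by
    ext x; simp [PySem.Set.mem_inter, PySem.Set.mem_ofList]
  set U : Finset (List Char) := g1.toFinset ∪ g2.toFinset with hU
  have c0_1 : ∀ x, x ∉ g1.toFinset → (g1.count x : Int) = 0 := by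
    intro x hx
    rw [List.count_eq_zero.mpr (by simpa using hx)]; rfl
  have c0_2 : ∀ x, x ∉ g2.toFinset → (g2.count x : Int) = 0 := by
    intro x hx
    rw [List.count_eq_zero.mpr (by simpa using hx)]; rfl
  rw [sum_map_nodup _ _ (PySem.Set.nodup_inter _ _ (PySem.Set.nodup_ofList g1)),
      sum_map_nodup _ _ (PySem.Set.nodup_ofList g1),
      sum_map_nodup _ _ (PySem.Set.nodup_ofList g2), hf1, hf2, hfi,
      length_eq_sum_count g1, length_eq_sum_count g2]
  have e1 : ∑ a ∈ g1.toFinset, (g1.count a : Int) = ∑ a ∈ U, (g1.count a : Int) :=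
    Finset.sum_subset Finset.subset_union_left (fun x _ hx => c0_1 x hx)
  have e2 : ∑ a ∈ g2.toFinset, (g2.count a : Int) = ∑ a ∈ U, (g2.count a : Int) :=
    Finset.sum_subset Finset.subset_union_right (fun x _ hx => c0_2 x hx)
  have e3 : ∑ a ∈ g1.toFinset ∩ g2.toFinset, min (g1.count a : Int) (g2.count a : Int)
      = ∑ a ∈ U, min (g1.count a : Int) (g2.count a : Int) := by
    refine Finset.sum_subset (Finset.inter_subset_union) ?_
    intro x _ hx
    by_cases h1 : x ∈ g1.toFinset
    · have h2 : x ∉ g2.toFinset := fun h2 => hx (Finset.mem_inter.mpr ⟨h1, h2⟩)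
      have z2 := c0_2 x h2
      have p1 : (0 : Int) ≤ (g1.count x : Int) := Int.natCast_nonneg _
      omega
    · have z1 := c0_1 x h1
      have p2 : (0 : Int) ≤ (g2.count x : Int) := Int.natCast_nonneg _
      omega
  have e4 : ∑ a ∈ g1.toFinset, max ((g1.count a : Int) - (g2.count a : Int)) 0
      = ∑ a ∈ U, max ((g1.count a : Int) - (g2.count a : Int)) 0 := by
    refine Finset.sum_subset Finset.subset_union_left ?_
    intro x _ hx
    have z1 := c0_1 x hx
    have p2 : (0 : Int) ≤ (g2.count x : Int) := Int.natCast_nonneg _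
    omega
  have e5 : ∑ a ∈ g2.toFinset, max ((g2.count a : Int) - (g1.count a : Int)) 0
      = ∑ a ∈ U, max ((g2.count a : Int) - (g1.count a : Int)) 0 := by
    refine Finset.sum_subset Finset.subset_union_right ?_
    intro x _ hx
    have z2 := c0_2 x hx
    have p1 : (0 : Int) ≤ (g1.count x : Int) := Int.natCast_nonneg _
    omega
  rw [e1, e2, e3, e4, e5]
  have hpt : ∑ a ∈ U, ((g1.count a : Int) + (g2.count a : Int)
        - 2 * min ((g1.count a : Int)) ((g2.count a : Int)))
      = ∑ a ∈ U, (max ((g1.count a : Int) - (g2.count a : Int)) 0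
        + max ((g2.count a : Int) - (g1.count a : Int)) 0) :=
    Finset.sum_congr rfl (fun x _ => by omega)
  simpa [Finset.sum_sub_distrib, Finset.sum_add_distrib, Finset.mul_sum] using hpt

-- the two match arms agree for any pair of gram lists
theorem bodies_eq (g1 g2 : List (List Char)) :
    ((g1.length : Int) + (g2.length : Int))
      - 2 * ((PySem.Set.inter (PySem.Set.ofList g1) (PySem.Set.ofList g2)).foldl
          (fun acc element =>
            let m := (PySem.Dict.counter g1).getD element 0
            let n := (PySem.Dict.counter g2).getD element 0
            let num := min m n
            if num > 1 then acc + (num - 1) else acc)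
          ((PySem.Set.inter (PySem.Set.ofList g1) (PySem.Set.ofList g2)).length : Int))
    = ((PySem.Dict.counter g1).items.map
          (fun kv => max (kv.2 - (PySem.Dict.counter g2).getD kv.1 0) 0)).sum
      + ((PySem.Dict.counter g2).items.map
          (fun kv => max (kv.2 - (PySem.Dict.counter g1).getD kv.1 0) 0)).sum := by
  rw [loopA_eq]
  simp only [PySem.Dict.getD_counter, PySem.Dict.items_counter, List.map_map, Function.comp_def]
  rw [len_add_sum _ (fun e => min ((g1.count e : Int)) ((g2.count e : Int)))
      (by
        intro e he
        have h12 := (PySem.Set.mem_inter _ _ _).mp he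
        have h1 : e ∈ g1 := (PySem.Set.mem_ofList _ _).mp h12.1
        have h2 : e ∈ g2 := (PySem.Set.mem_ofList _ _).mp h12.2
        have p1 : 0 < g1.count e := List.count_pos_iff.mpr h1
        have p2 : 0 < g2.count e := List.count_pos_iff.mpr h2
        show (1 : Int) ≤ min ((g1.count e : Int)) ((g2.count e : Int))
        omega)]
  exact key_identity g1 g2

-- ===== VERDICT (by name: the statement is the Claim_ definition above) =====
theorem calc_py_spec : Claim_equal_calc_py := by
  unfold Claim_equal_calc_py
  intro s1 s2 _ _
  unfold Spec_calc_py calc_py calc_py_alt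
  have hg : pvGramsB? = pvGrams? := rfl
  rw [hg]
  cases h1 : pvGrams? s1.toList 2 <;> cases h2 : pvGrams? s2.toList 2
  case some.some g1 g2 => exact bodies_eq g1 g2
  all_goals rfl
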